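-- pv_equiv track=rewrite | github.com/Edward-K1/validatedata | validatedata/validatedata.py | _is_pipe_delimiter
-- ===== SOURCE A (Python) =====
-- _PIPE_BARE_KEYWORDS = frozenset({
--     'strict', 'nullable', 'unique',
--     'strip', 'lstrip', 'rstrip', 'lower', 'upper', 'title',
-- })
--
-- _PIPE_VALUE_KEYWORDS = frozenset({
--     'min:', 'max:', 'between:', 'in:', 'not_in:',
--     'starts_with:', 'ends_with:', 'contains:',
--     'format:', 're:', 'msg:',
-- })
--
-- def _is_pipe_delimiter(s, pos):
--     """Return True if the | at pos is a recognised modifier boundary."""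
--     rest = s[pos + 1:]
--     for kw in _PIPE_VALUE_KEYWORDS:
--         if rest.startswith(kw):
--             return True
--     for kw in _PIPE_BARE_KEYWORDS:
--         if rest.startswith(kw):
--             after = rest[len(kw):]
--             if after == '' or after[0] == '|':
--                 return True
--     return False
-- ===== SOURCE B (Python) =====
-- _PIPE_BARE_KEYWORDS = frozenset({
--     'strict', 'nullable', 'unique',
--     'strip', 'lstrip', 'rstrip', 'lower', 'upper', 'title',
-- })
--
-- _PIPE_VALUE_KEYWORDS = frozenset({
--     'min:', 'max:', 'between:', 'in:', 'not_in:',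
--     'starts_with:', 'ends_with:', 'contains:',
--     'format:', 're:', 'msg:',
-- })
--
-- def _is_pipe_delimiter(s, pos):
--     """Return True if the | at pos is a recognised modifier boundary."""
--     rest = s[pos + 1:]
--     colon = rest.find(':')
--     if colon != -1 and rest[:colon + 1] in _PIPE_VALUE_KEYWORDS:
--         return True
--     bar = rest.find('|')
--     word = rest if bar == -1 else rest[:bar]
--     return word in _PIPE_BARE_KEYWORDS
-- ===== Notes on version B (the rewrite author's own statement) =====
-- stated objective: simpler
-- what changed: B replaces A's two startswith-loops over the keyword sets by finding the first ':' and the first '|' in rest once and testing two tokens for set membership (rest[:colon+1] against the value keywords, the word before the first '|' against the bare keywords).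
import Mathlib
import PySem

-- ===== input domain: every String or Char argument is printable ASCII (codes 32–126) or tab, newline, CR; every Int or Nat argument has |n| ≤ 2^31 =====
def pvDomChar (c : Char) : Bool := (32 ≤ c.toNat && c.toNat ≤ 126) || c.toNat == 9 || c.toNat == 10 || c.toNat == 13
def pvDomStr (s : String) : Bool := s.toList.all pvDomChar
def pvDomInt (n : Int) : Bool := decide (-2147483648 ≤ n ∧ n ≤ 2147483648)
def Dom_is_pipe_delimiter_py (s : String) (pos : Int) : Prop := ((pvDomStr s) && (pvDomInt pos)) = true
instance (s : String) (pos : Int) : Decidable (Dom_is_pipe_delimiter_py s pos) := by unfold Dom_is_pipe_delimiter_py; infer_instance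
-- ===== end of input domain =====

-- B replaces A's two startswith-loops over the keyword sets by locating the first ':' and the
-- first '|' in rest once and doing two direct set-membership lookups (objective: simpler).

-- ===== PORT A =====
def pvValueKws : List (List Char) :=
  ["min:".toList, "max:".toList, "between:".toList, "in:".toList, "not_in:".toList,
   "starts_with:".toList, "ends_with:".toList, "contains:".toList,
   "format:".toList, "re:".toList, "msg:".toList]

def pvBareKws : List (List Char) :=
  ["strict".toList, "nullable".toList, "unique".toList,
   "strip".toList, "lstrip".toList, "rstrip".toList,
   "lower".toList, "upper".toList, "title".toList]

-- A's first loop: 'for kw in _PIPE_VALUE_KEYWORDS: if rest.startswith(kw): return True'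
def pvALoopValue : List (List Char) → List Char → Bool
  | [], _ => false
  | kw :: kws, rest =>
    if PySem.Chars.startswith rest kw then true else pvALoopValue kws rest

-- A's second loop: startswith plus the "after == '' or after[0] == '|'" boundary test
def pvALoopBare : List (List Char) → List Char → Bool
  | [], _ => false
  | kw :: kws, rest =>
    if PySem.Chars.startswith rest kw then
      match rest.drop kw.length with
      | [] => true
      | c :: _ => if c = '|' then true else pvALoopBare kws rest
    else pvALoopBare kws rest

def is_pipe_delimiter_py (s : String) (pos : Int) : Bool :=
  let rest := PySem.List.slice s.toList (some (pos + 1)) none   -- rest = s[pos+1:]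
  if pvALoopValue pvValueKws rest then true
  else pvALoopBare pvBareKws rest

-- ===== PORT B =====
def is_pipe_delimiter_py_alt (s : String) (pos : Int) : Bool :=
  let rest := PySem.List.slice s.toList (some (pos + 1)) none   -- rest = s[pos+1:]
  let colon := PySem.Chars.find rest [':']                      -- colon = rest.find(':')
  if colon ≠ -1 && pvValueKws.contains (PySem.List.slice rest none (some (colon + 1))) then
    true
  else
    let bar := PySem.Chars.find rest ['|']                      -- bar = rest.find('|')
    let word := if bar = -1 then rest else PySem.List.slice rest none (some bar)
    pvBareKws.contains word

-- ===== PRECONDITION & SPEC =====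
def Spec_is_pipe_delimiter_py (s : String) (pos : Int) (out : Bool) : Prop := out = is_pipe_delimiter_py_alt s pos
instance (s : String) (pos : Int) (out : Bool) : Decidable (Spec_is_pipe_delimiter_py s pos out) := by unfold Spec_is_pipe_delimiter_py; infer_instance

-- ===== CLAIM (what is proved, stated in full; the proofs are below) =====
def Claim_equal_is_pipe_delimiter_py : Prop := ∀ (s : String) (pos : Int), Dom_is_pipe_delimiter_py s pos → Spec_is_pipe_delimiter_py s pos (is_pipe_delimiter_py s pos)

-- ===== LEMMAS AND PROOFS =====

-- a one-character pattern is a prefix of l iff l starts with that character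
theorem pvSingletonPrefix (l : List Char) (a : Char) : [a] <+: l ↔ l[0]? = some a := by
  cases l with
  | nil => simp
  | cons x t =>
    simp only [List.getElem?_cons_zero, Option.some.injEq]
    constructor
    · rintro ⟨u, hu⟩; cases hu; rfl
    · rintro rfl; exact ⟨t, rfl⟩

theorem pvMemInfix (l : List Char) (a : Char) (h : a ∈ l) : [a] <:+: l := by
  obtain ⟨p, q, rfl⟩ := List.mem_iff_append.mp h
  exact ⟨p, q, by simp⟩

theorem pvPrefixGetElem (l w : List Char) (h : w <+: l) (i : Nat) (hi : i < w.length) :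
    l[i]? = some w[i] := by
  obtain ⟨t, rfl⟩ := h
  rw [List.getElem?_append_left hi]; simp [hi]

-- if w is a prefix of cs, the character d follows it immediately, and d does not occur in w,
-- then the FIRST occurrence of d in cs is exactly at index w.length
theorem pvFindAt (cs w : List Char) (d : Char) (hw : w <+: cs)
    (hd : [d] <+: cs.drop w.length) (hnot : d ∉ w) :
    PySem.Chars.find cs [d] = (w.length : Int) := by
  have hmem : d ∈ cs := by
    have h0 := (pvSingletonPrefix _ d).mp hd
    rw [List.getElem?_drop] at h0
    exact List.mem_of_getElem? h0
  have h0 : 0 ≤ PySem.Chars.find cs [d] :=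
    (PySem.Chars.find_nonneg_iff cs [d]).mpr (pvMemInfix cs d hmem)
  obtain ⟨hocc, hmin⟩ := PySem.Chars.find_spec h0
  have hle : (PySem.Chars.find cs [d]).toNat ≤ w.length := by
    by_contra h
    exact hmin w.length (by omega) hd
  have heq : (PySem.Chars.find cs [d]).toNat = w.length := by
    rcases Nat.lt_or_ge (PySem.Chars.find cs [d]).toNat w.length with hlt | hge
    · exfalso
      have h1 := (pvSingletonPrefix _ d).mp hocc
      rw [List.getElem?_drop] at h1
      have h2 := pvPrefixGetElem cs w hw _ hlt
      rw [Nat.add_zero] at h1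
      rw [h1] at h2
      injection h2 with h3
      exact hnot (by rw [h3]; exact List.getElem_mem hlt)
    · omega
  omega

-- A's value loop is List.any over the keyword list
theorem pvLoopValueAny (kws : List (List Char)) (cs : List Char) :
    pvALoopValue kws cs = kws.any (fun kw => PySem.Chars.startswith cs kw) := by
  induction kws with
  | nil => rfl
  | cons kw kws ih =>
    simp only [pvALoopValue, List.any_cons]
    by_cases h : PySem.Chars.startswith cs kw <;> simp [h, ih]

-- A's bare-keyword test for one keyword (startswith plus boundary), as a predicate
def pvBareHit (cs kw : List Char) : Bool :=
  PySem.Chars.startswith cs kw &&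
    (match cs.drop kw.length with
     | [] => true
     | c :: _ => c = '|')

-- A's bare loop is List.any of that predicate
theorem pvLoopBareAny (kws : List (List Char)) (cs : List Char) :
    pvALoopBare kws cs = kws.any (pvBareHit cs) := by
  induction kws with
  | nil => rfl
  | cons kw kws ih =>
    simp only [pvALoopBare, List.any_cons, pvBareHit]
    by_cases h : PySem.Chars.startswith cs kw
    · simp only [h, if_true, Bool.true_and]
      rcases hdrop : cs.drop kw.length with _ | ⟨c, t⟩
      · simp
      · by_cases hc : c = '|' <;> simp [hc, ih]
    · simp [h, ih]

-- A's value loop equals B's first-colon membership test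
theorem pvValueEq (cs : List Char) :
    pvALoopValue pvValueKws cs =
      (decide (PySem.Chars.find cs [':'] ≠ -1) &&
        pvValueKws.contains (PySem.List.slice cs none (some (PySem.Chars.find cs [':'] + 1)))) := by
  rw [pvLoopValueAny]
  apply Bool.eq_iff_iff.mpr
  simp only [List.any_eq_true, Bool.and_eq_true, decide_eq_true_eq, List.contains_iff_mem,
    PySem.Chars.startswith_iff]
  constructor
  · rintro ⟨kw, hmem, hpre⟩
    have hstruct : ∀ kw ∈ pvValueKws, kw.dropLast ++ [':'] = kw ∧ ':' ∉ kw.dropLast := by decide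
    obtain ⟨hsplit, hnotin⟩ := hstruct kw hmem
    set w := kw.dropLast with hwdef
    have hwpre : w <+: cs := List.IsPrefix.trans ⟨[':'], hsplit⟩ hpre
    have hdpre : [':'] <+: cs.drop w.length := by
      obtain ⟨t, hcs⟩ := hpre
      rw [← hcs, ← hsplit, List.append_assoc, List.drop_left]
      exact ⟨t, rfl⟩
    have hfind := pvFindAt cs w ':' hwpre hdpre hnotin
    refine ⟨by rw [hfind]; omega, ?_⟩
    rw [hfind, PySem.List.slice_to cs (by omega)]
    have hlen : ((w.length : Int) + 1).toNat = kw.length := by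
      have : w.length + 1 = kw.length := by
        rw [← hsplit]; simp
      omega
    rw [hlen, ← List.prefix_iff_eq_take.mp hpre]
    exact hmem
  · rintro ⟨hne, hmem⟩
    have h0 : 0 ≤ PySem.Chars.find cs [':'] := by
      have := PySem.Chars.neg_one_le_find cs [':']
      omega
    refine ⟨_, hmem, ?_⟩
    rw [PySem.List.slice_to cs (by omega)]
    exact List.take_prefix _ _

-- A's bare loop equals B's first-bar word membership test
theorem pvBareEq (cs : List Char) :
    pvALoopBare pvBareKws cs =
      pvBareKws.contains
        (if PySem.Chars.find cs ['|'] = -1 then cs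
         else PySem.List.slice cs none (some (PySem.Chars.find cs ['|']))) := by
  rw [pvLoopBareAny]
  apply Bool.eq_iff_iff.mpr
  simp only [List.any_eq_true, List.contains_iff_mem]
  constructor
  · rintro ⟨kw, hmem, hhit⟩
    have hbar : ∀ kw ∈ pvBareKws, '|' ∉ kw := by decide
    simp only [pvBareHit, Bool.and_eq_true, PySem.Chars.startswith_iff] at hhit
    obtain ⟨hpre, hbound⟩ := hhit
    rcases hdrop : cs.drop kw.length with _ | ⟨c, t⟩
    · -- after == '': cs = kw, and '|' not in cs, so find = -1 and word = cs = kw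
      have hlen : cs.length ≤ kw.length := by
        have := congrArg List.length hdrop
        simp at this
        omega
      have hcs : kw = cs := List.IsPrefix.eq_of_length hpre
        (le_antisymm hpre.length_le hlen)
      have hfind : PySem.Chars.find cs ['|'] = -1 := by
        rw [PySem.Chars.find_eq_neg_one_iff]
        intro hinf
        exact hbar kw hmem (hcs ▸ (List.singleton_sublist).mp hinf.sublist)
      rw [hfind, if_pos rfl]
      exact hcs ▸ hmem
    · -- after[0] == '|': first '|' is right after kw, word = kw
      rw [hdrop] at hbound
      simp only [decide_eq_true_eq] at hbound
      subst hbound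
      have hfind := pvFindAt cs kw '|' hpre (by rw [hdrop]; exact ⟨t, rfl⟩) (hbar kw hmem)
      rw [hfind, if_neg (by omega), PySem.List.slice_to cs (by omega)]
      rw [Int.toNat_natCast, ← List.prefix_iff_eq_take.mp hpre]
      exact hmem
  · intro hmem
    by_cases hf : PySem.Chars.find cs ['|'] = -1
    · rw [if_pos hf] at hmem
      refine ⟨cs, hmem, ?_⟩
      simp only [pvBareHit, Bool.and_eq_true, PySem.Chars.startswith_iff]
      exact ⟨List.prefix_refl cs, by simp [List.drop_length]⟩
    · have h0 : 0 ≤ PySem.Chars.find cs ['|'] := by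
        have := PySem.Chars.neg_one_le_find cs ['|']
        omega
      obtain ⟨hocc, -⟩ := PySem.Chars.find_spec h0
      rw [if_neg hf, PySem.List.slice_to cs h0] at hmem
      set n := (PySem.Chars.find cs ['|']).toNat with hn
      have hne : cs.drop n ≠ [] := by
        intro h
        rw [h] at hocc
        simpa using hocc.length_le
      have hflt : n < cs.length := by
        by_contra h
        exact hne (List.drop_eq_nil_of_le (by omega))
      refine ⟨cs.take n, hmem, ?_⟩
      simp only [pvBareHit, Bool.and_eq_true, PySem.Chars.startswith_iff]
      refine ⟨List.take_prefix _ _, ?_⟩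
      have hlen : (cs.take n).length = n := by simp [hflt.le]
      rw [hlen]
      rcases hdrop : cs.drop n with _ | ⟨c, t⟩
      · exact absurd hdrop hne
      · rw [hdrop] at hocc
        obtain ⟨u, hu⟩ := hocc
        injection hu with h1 h2
        simp [← h1]

-- ===== VERDICT (by name: the statement is the Claim_ definition above) =====
theorem is_pipe_delimiter_py_spec : Claim_equal_is_pipe_delimiter_py := by
  intro s pos _
  unfold Spec_is_pipe_delimiter_py is_pipe_delimiter_py is_pipe_delimiter_py_alt
  simp only [pvValueEq, pvBareEq]
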